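-- pv_equiv track=rewrite | github.com/0xCompileError/ResumeTuner | backend/main.py | _join_sections
-- ===== SOURCE A (Python) =====
-- from typing import Dict, Optional, List
--
-- def _join_sections(preamble: str, sections: List[tuple[str, List[str]]]) -> str:
--     parts: List[str] = []
--     pre = (preamble or "").rstrip()
--     if pre:
--         parts.append(pre)
--     for hdr, body_lines in sections:
--         if parts:
--             parts.append("")  # blank line before each section
--         parts.append(hdr)
--         body = "\n".join(body_lines).rstrip()
--         if body:
--             parts.append(body)
--         else:
--             # leave section blank (no placeholders)
--             pass
--     return "\n".join(parts).rstrip() + "\n"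
-- ===== SOURCE B (Python) =====
-- def _join_sections(preamble, sections):
--     # Right-to-left recursion: rec(secs) returns the already fully right-stripped
--     # text for the remaining sections; no parts list and no global final rstrip.
--     def rec(secs):
--         if not secs:
--             return ""
--         hdr, body_lines = secs[0]
--         rest = rec(secs[1:])
--         body = "\n".join(body_lines).rstrip()
--         block = hdr + "\n" + body if body else hdr
--         return block + "\n\n" + rest if rest else block.rstrip()
--
--     pre = (preamble or "").rstrip()
--     tail = rec(sections)
--     if pre and tail:
--         return pre + "\n\n" + tail + "\n"
--     return (pre or tail) + "\n"
-- ===== Notes on version B (the rewrite author's own statement) =====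
-- stated objective: alternative
-- what changed: B replaces A's left-to-right accumulation into a mutable parts list followed by one global final rstrip with a right-to-left recursion over the sections that returns an already right-stripped tail, so separators are decided from the tail's emptiness and only local rstrips are needed.
import Mathlib
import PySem

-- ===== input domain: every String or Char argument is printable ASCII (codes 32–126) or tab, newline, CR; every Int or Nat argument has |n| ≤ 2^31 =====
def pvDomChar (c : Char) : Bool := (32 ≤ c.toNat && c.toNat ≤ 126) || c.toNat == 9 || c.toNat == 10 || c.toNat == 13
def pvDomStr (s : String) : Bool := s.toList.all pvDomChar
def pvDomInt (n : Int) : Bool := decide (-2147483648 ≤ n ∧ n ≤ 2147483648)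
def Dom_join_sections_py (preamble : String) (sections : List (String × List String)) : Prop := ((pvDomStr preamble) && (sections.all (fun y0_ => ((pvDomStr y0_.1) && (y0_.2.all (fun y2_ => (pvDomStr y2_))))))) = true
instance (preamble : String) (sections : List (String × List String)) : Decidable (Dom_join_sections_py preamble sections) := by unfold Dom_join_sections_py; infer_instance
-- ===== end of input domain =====

-- B replaces A's left-to-right accumulation into a mutable parts list (with its `if parts`
-- separator guard and one global final rstrip) by a right-to-left recursion over the
-- sections returning an already right-stripped tail; same cost, a different decomposition.

-- ===== PORT A =====
-- one section step of A's for-loop over `parts` (works on List Char; strings enter via .toList)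
def pvStepA (parts : List (List Char)) (sec : String × List String) : List (List Char) :=
  let parts1 := if parts ≠ [] then parts ++ [([] : List Char)] else parts
  let parts2 := parts1 ++ [sec.1.toList]
  let body := PySem.Chars.rstrip (PySem.Chars.join ['\n'] (sec.2.map String.toList))
  if body ≠ [] then parts2 ++ [body] else parts2

def join_sections_py (preamble : String) (sections : List (String × List String)) : String :=
  let pre := PySem.Chars.rstrip (if preamble.toList = [] then [] else preamble.toList)
  let parts0 : List (List Char) := if pre ≠ [] then [pre] else []
  let parts := sections.foldl pvStepA parts0
  String.ofList (PySem.Chars.rstrip (PySem.Chars.join ['\n'] parts) ++ ['\n'])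

-- ===== PORT B =====
-- B's inner `rec`: text of the remaining sections, already right-stripped
def pvRecB : List (String × List String) → List Char
  | [] => []
  | sec :: rest =>
    let tail := pvRecB rest
    let body := PySem.Chars.rstrip (PySem.Chars.join ['\n'] (sec.2.map String.toList))
    let block := if body ≠ [] then sec.1.toList ++ '\n' :: body else sec.1.toList
    if tail ≠ [] then block ++ '\n' :: '\n' :: tail else PySem.Chars.rstrip block

def join_sections_py_alt (preamble : String) (sections : List (String × List String)) : String :=
  let pre := PySem.Chars.rstrip (if preamble.toList = [] then [] else preamble.toList)
  let tail := pvRecB sections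
  if pre ≠ [] ∧ tail ≠ [] then String.ofList (pre ++ '\n' :: '\n' :: tail ++ ['\n'])
  else String.ofList ((if pre ≠ [] then pre else tail) ++ ['\n'])

-- ===== PRECONDITION & SPEC =====
def Spec_join_sections_py (preamble : String) (sections : List (String × List String)) (out : String) : Prop := out = join_sections_py_alt preamble sections
instance (preamble : String) (sections : List (String × List String)) (out : String) : Decidable (Spec_join_sections_py preamble sections out) := by unfold Spec_join_sections_py; infer_instance

-- ===== CLAIM (what is proved, stated in full; the proofs are below) =====
def Claim_equal_join_sections_py : Prop := ∀ (preamble : String) (sections : List (String × List String)), Dom_join_sections_py preamble sections → Spec_join_sections_py preamble sections (join_sections_py preamble sections)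

-- ===== LEMMAS AND PROOFS =====

-- the block string of one section (proof-side abbreviation shared by both analyses)
def pvBlock (sec : String × List String) : List Char :=
  let body := PySem.Chars.rstrip (PySem.Chars.join ['\n'] (sec.2.map String.toList))
  if body ≠ [] then sec.1.toList ++ '\n' :: body else sec.1.toList

-- the raw text A's loop appends after the existing parts, as one flat char list
def pvTailRaw (secs : List (String × List String)) : List Char :=
  (secs.map (fun s => '\n' :: '\n' :: pvBlock s)).flatten

lemma pv_recB_cons (sec : String × List String) (rest : List (String × List String)) :
    pvRecB (sec :: rest) = if pvRecB rest ≠ [] then pvBlock sec ++ '\n' :: '\n' :: pvRecB rest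
      else PySem.Chars.rstrip (pvBlock sec) := rfl

lemma pv_rstrip_append (a b : List Char) :
    PySem.Chars.rstrip (a ++ b)
      = if PySem.Chars.rstrip b = [] then PySem.Chars.rstrip a else a ++ PySem.Chars.rstrip b := by
  simp only [PySem.Chars.rstrip, List.reverse_append, List.dropWhile_append]
  by_cases h : List.dropWhile PySem.Chars.isspace b.reverse = []
  · simp [h]
  · simp [h, List.isEmpty_iff]

lemma pv_rstrip_idem (a : List Char) :
    PySem.Chars.rstrip (PySem.Chars.rstrip a) = PySem.Chars.rstrip a := by
  simp only [PySem.Chars.rstrip, List.reverse_reverse]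
  rw [List.dropWhile_eq_self_iff.mpr]
  intro h
  have hh := List.head?_dropWhile_not PySem.Chars.isspace a.reverse
  rw [List.head?_eq_getElem?, List.getElem?_eq_getElem h] at hh
  simp only [] at hh
  simp [hh]

lemma pv_join_append (sep : List Char) (xs ys : List (List Char)) (hx : xs ≠ []) (hy : ys ≠ []) :
    PySem.Chars.join sep (xs ++ ys) = PySem.Chars.join sep xs ++ sep ++ PySem.Chars.join sep ys := by
  induction xs with
  | nil => exact absurd rfl hx
  | cons a xs ih =>
    cases xs with
    | nil =>
      cases ys with
      | nil => exact absurd rfl hy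
      | cons b ys =>
        simp [PySem.Chars.join_cons_cons, PySem.Chars.join_singleton]
    | cons b xs =>
      have h := ih (by simp)
      simp only [List.cons_append, PySem.Chars.join_cons_cons] at *
      simp [h, List.append_assoc]

lemma pv_step_ne (parts : List (List Char)) (sec : String × List String) :
    pvStepA parts sec ≠ [] := by
  unfold pvStepA
  by_cases hbody : PySem.Chars.rstrip (PySem.Chars.join ['\n'] (sec.2.map String.toList)) = [] <;>
    simp [hbody]

lemma pv_step_join_nonempty (parts : List (List Char)) (sec : String × List String)
    (hp : parts ≠ []) :
    PySem.Chars.join ['\n'] (pvStepA parts sec)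
      = PySem.Chars.join ['\n'] parts ++ '\n' :: '\n' :: pvBlock sec := by
  unfold pvStepA pvBlock
  by_cases hbody : PySem.Chars.rstrip (PySem.Chars.join ['\n'] (sec.2.map String.toList)) = []
  · simp only [hbody, hp, ne_eq, not_false_eq_true, ite_true, not_true_eq_false, ite_false,
      List.append_assoc]
    rw [pv_join_append ['\n'] parts ([[]] ++ [sec.1.toList]) hp (by simp)]
    simp [PySem.Chars.join_cons_cons, PySem.Chars.join_singleton]
  · simp only [hbody, hp, ne_eq, not_false_eq_true, ite_true, List.append_assoc]
    rw [pv_join_append ['\n'] parts ([[]] ++ ([sec.1.toList] ++ [_])) hp (by simp)]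
    simp [PySem.Chars.join_cons_cons, PySem.Chars.join_singleton]

lemma pv_step_join_nil (sec : String × List String) :
    PySem.Chars.join ['\n'] (pvStepA [] sec) = pvBlock sec := by
  unfold pvStepA pvBlock
  by_cases hbody : PySem.Chars.rstrip (PySem.Chars.join ['\n'] (sec.2.map String.toList)) = [] <;>
    simp [hbody, PySem.Chars.join_cons_cons, PySem.Chars.join_singleton]

lemma pv_fold_join (secs : List (String × List String)) (parts : List (List Char))
    (hp : parts ≠ []) :
    PySem.Chars.join ['\n'] (secs.foldl pvStepA parts)
      = PySem.Chars.join ['\n'] parts ++ pvTailRaw secs := by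
  induction secs generalizing parts with
  | nil => simp [pvTailRaw]
  | cons sec secs ih =>
    have h2 := ih (pvStepA parts sec) (pv_step_ne parts sec)
    rw [List.foldl_cons, h2, pv_step_join_nonempty parts sec hp]
    simp [pvTailRaw, List.append_assoc]

lemma pv_rstrip_tail (secs : List (String × List String)) (P : List Char) :
    PySem.Chars.rstrip (P ++ pvTailRaw secs)
      = if pvRecB secs ≠ [] then P ++ '\n' :: '\n' :: pvRecB secs else PySem.Chars.rstrip P := by
  induction secs generalizing P with
  | nil => simp [pvTailRaw, pvRecB]
  | cons sec secs ih =>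
    have hflat : P ++ pvTailRaw (sec :: secs)
        = (P ++ '\n' :: '\n' :: pvBlock sec) ++ pvTailRaw secs := by
      simp [pvTailRaw, List.append_assoc]
    rw [hflat, ih, pv_recB_cons]
    by_cases hrec : pvRecB secs = []
    · simp only [hrec, ne_eq, not_true_eq_false, ite_false]
      have h2 : ('\n' :: '\n' :: pvBlock sec : List Char) = ['\n', '\n'] ++ pvBlock sec := rfl
      rw [h2, ← List.append_assoc, pv_rstrip_append (P ++ ['\n', '\n']) (pvBlock sec),
        pv_rstrip_append P ['\n', '\n']]
      have hws : PySem.Chars.rstrip (['\n', '\n'] : List Char) = [] := by decide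
      by_cases hb : PySem.Chars.rstrip (pvBlock sec) = []
      · simp [hb, hws]
      · simp [hb, List.append_assoc]
    · simp [hrec, List.append_assoc]

-- ===== VERDICT (by name: the statement is the Claim_ definition above) =====
theorem join_sections_py_spec : Claim_equal_join_sections_py := by
  intro preamble sections _
  unfold Spec_join_sections_py join_sections_py join_sections_py_alt
  set pre := PySem.Chars.rstrip (if preamble.toList = [] then [] else preamble.toList) with hpre
  have hpre_r : PySem.Chars.rstrip pre = pre := by
    rw [hpre]; exact pv_rstrip_idem _
  by_cases hp : pre = []
  · -- no preamble content: parts0 = []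
    simp only [hp, ne_eq, not_true_eq_false, ite_false, false_and]
    cases sections with
    | nil => simp [pvRecB, PySem.Chars.rstrip]
    | cons sec rest =>
      rw [List.foldl_cons, pv_fold_join rest (pvStepA [] sec) (pv_step_ne [] sec),
        pv_step_join_nil, pv_rstrip_tail, pv_recB_cons]
  · -- preamble present: parts0 = [pre]
    simp only [hp, ne_eq, not_false_eq_true, ite_true, true_and]
    rw [pv_fold_join sections [pre] (by simp), PySem.Chars.join_singleton, pv_rstrip_tail]
    by_cases hrec : pvRecB sections = []
    · simp [hrec, hpre_r]
    · simp [hrec, List.append_assoc]
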